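-- pv_equiv track=rewrite | github.com/Billz95/ACM_practice | unsw5/tidyNum.py | nextTidy
-- ===== SOURCE A (Python) =====
-- def nextTidy(mid):
--     chNum = list(str(mid))
--
--     # check if it is tidy first
--     tidy = True
--     pre = chNum[0]
--     for i, ch in enumerate(chNum):
--         if pre > ch:
--             for j in range(i, len(chNum)):
--                 chNum[j] = pre
--             tidy = False
--             break
--         pre = ch
--     if not tidy:
--         return int(''.join(chNum))
--     else:
--         return nextTidy(mid+1)
-- ===== SOURCE B (Python) =====
-- def nextTidy(mid):
--     while True:
--         s = str(mid)
--         k = next((k for k, (a, b) in enumerate(zip(s, s[1:])) if a > b), None)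
--         if k is not None:
--             return int(s[:k + 1] + s[k] * (len(s) - k - 1))
--         mid += 1
-- ===== Notes on version B (the rewrite author's own statement) =====
-- stated objective: idiomatic
-- what changed: Replaced the tail recursion on mid+1 with a while-True loop, the pre-carrying enumerate scan with a zip(s, s[1:]) adjacent-pair search via next(), and the in-place list fill plus join with string slicing and character repetition.
import Mathlib
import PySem

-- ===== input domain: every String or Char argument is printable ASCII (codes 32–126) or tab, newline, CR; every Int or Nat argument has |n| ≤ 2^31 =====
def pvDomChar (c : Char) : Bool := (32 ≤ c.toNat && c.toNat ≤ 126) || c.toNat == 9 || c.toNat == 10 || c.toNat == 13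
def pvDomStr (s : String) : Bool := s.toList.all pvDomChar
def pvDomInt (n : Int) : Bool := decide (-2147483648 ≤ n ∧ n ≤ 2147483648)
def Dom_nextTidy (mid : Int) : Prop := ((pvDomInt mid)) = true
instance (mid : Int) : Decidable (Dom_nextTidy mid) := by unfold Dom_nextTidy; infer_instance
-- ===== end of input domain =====

-- B replaces A's tail recursion on mid+1 by a while-loop that finds the first adjacent
-- descent by scanning zipped pairs and rebuilds the result by slicing/repetition instead
-- of an in-place fill (objective: idiomatic; same asymptotic cost).


-- ===== PORT A =====
-- A's for-loop over enumerate(chNum) with the running `pre` and early break; on a break it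
-- returns the list after the fill `for j in range(i, len(chNum)): chNum[j] = pre`
-- (none = the loop finished without break, i.e. tidy stayed True).
def pyAScan : List (Int × Char) → Char → List Char → Option (List Char)
  | [], _, _ => none
  | (i, ch) :: rest, pre, chNum =>
      if pre > ch then
        some ((PySem.List.pyRange i (chNum.length : Int) 1).foldl
                (fun acc j => PySem.List.pySetD acc j pre) chNum)
      else pyAScan rest ch chNum

-- the tail recursion `return nextTidy(mid+1)`, made total with fuel; runs of consecutive
-- integers whose digit string is non-decreasing are short (a multiple of ten is nearby),
-- so the fuel is never exhausted on Dom_nextTidy.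
def nextTidyGo : Nat → Int → Int
  | 0, _ => 0
  | fuel+1, mid =>
      let chNum := PySem.Int.toChars mid            -- list(str(mid))
      let pre := PySem.List.pyGetD chNum 0 ' '      -- chNum[0]; str(mid) is never empty
      match pyAScan (PySem.List.enumerate chNum 0) pre chNum with
      | some filled => (PySem.Int.ofChars? filled).getD 0   -- int(''.join(chNum)); always parses
      | none => nextTidyGo fuel (mid + 1)

def nextTidy (mid : Int) : Int := nextTidyGo 64 mid

-- ===== PORT B =====
-- first k with s[k] > s[k+1], scanning adjacent pairs (zip(s, s[1:])), together with s[k]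
def pyBFind : List Char → Nat → Option (Nat × Char)
  | a :: b :: rest, k => if a > b then some (k, a) else pyBFind (b :: rest) (k + 1)
  | _, _ => none

-- B's `while True:` loop, made total with the same fuel bound
def nextTidyAltGo : Nat → Int → Int
  | 0, _ => 0
  | fuel+1, mid =>
      let s := PySem.Int.toChars mid                -- str(mid)
      match pyBFind s 0 with
      | some (k, a) =>
          -- int(s[:k+1] + s[k] * (len(s) - k - 1))
          (PySem.Int.ofChars? (s.take (k + 1) ++ List.replicate (s.length - k - 1) a)).getD 0
      | none => nextTidyAltGo fuel (mid + 1)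

def nextTidy_alt (mid : Int) : Int := nextTidyAltGo 64 mid

-- ===== PRECONDITION & SPEC =====
def Spec_nextTidy (mid : Int) (out : Int) : Prop := out = nextTidy_alt mid
instance (mid : Int) (out : Int) : Decidable (Spec_nextTidy mid out) := by unfold Spec_nextTidy; infer_instance

-- ===== CLAIM (what is proved, stated in full; the proofs are below) =====
def Claim_equal_nextTidy : Prop := ∀ (mid : Int), Dom_nextTidy mid → Spec_nextTidy mid (nextTidy mid)

-- ===== LEMMAS AND PROOFS =====

lemma take_set (l : List Char) (i : Nat) (a : Char) (h : i < l.length) :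
    (l.set i a).take (i+1) = l.take i ++ [a] := by
  rw [List.set_eq_take_append_cons_drop, if_pos h, List.take_append]
  simp [List.length_take, Nat.min_eq_left (Nat.le_of_lt h)]

-- A's fill loop overwrites the suffix from position i with pre.
lemma fill_eq (s : List Char) (pre : Char) (i : Nat) (h : i ≤ s.length) :
    (PySem.List.pyRange (i : Int) (s.length : Int) 1).foldl
        (fun acc j => PySem.List.pySetD acc j pre) s
      = s.take i ++ List.replicate (s.length - i) pre := by
  induction hd : s.length - i generalizing s i with
  | zero =>
    have : i = s.length := by omega
    subst this
    rw [PySem.List.pyRange_one_eq_nil le_rfl]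
    simp
  | succ d ihd =>
    have hi : i < s.length := by omega
    rw [PySem.List.pyRange_one_cons (by exact_mod_cast hi)]
    simp only [List.foldl_cons, PySem.List.pySetD_natCast]
    have hlen : (s.set i pre).length = s.length := by simp
    have cast1 : (i : Int) + 1 = ((i+1 : Nat) : Int) := by push_cast; ring
    rw [cast1, ← hlen]
    rw [ihd (s.set i pre) (i+1) (by omega) (by omega)]
    rw [take_set s i pre hi, List.replicate_succ, List.append_assoc]
    rfl

-- A's scan (running pre, indices from k+1) agrees with B's adjacent-pair scan.
lemma scan_eq (tail : List Char) (pre : Char) (k : Nat) (full : List Char)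
    (h : k + 1 + tail.length = full.length) :
    pyAScan (PySem.List.enumerate tail ((k : Int) + 1)) pre full
      = (pyBFind (pre :: tail) k).map
          (fun p => full.take (p.1 + 1) ++ List.replicate (full.length - p.1 - 1) p.2) := by
  induction tail generalizing pre k with
  | nil => simp [PySem.List.enumerate_nil, pyAScan, pyBFind]
  | cons ch rest ih =>
    rw [PySem.List.enumerate_cons]
    simp only [pyAScan, pyBFind]
    by_cases hc : pre > ch
    · rw [if_pos hc, if_pos hc]
      have cast1 : (k : Int) + 1 = ((k+1 : Nat) : Int) := by push_cast; ring
      rw [cast1, fill_eq full pre (k+1) (by simp at h; omega)]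
      simp only [Option.map_some]
      have : full.length - (k+1) = full.length - k - 1 := by omega
      rw [this]
    · rw [if_neg hc, if_neg hc]
      have cast1 : (k : Int) + 1 + 1 = ((k+1 : Nat) : Int) + 1 := by push_cast; ring
      rw [cast1]
      exact ih ch (k+1) (by simp at h ⊢; omega)

lemma step_eq (fuel : Nat) (mid : Int)
    (ih : ∀ m, nextTidyGo fuel m = nextTidyAltGo fuel m) :
    nextTidyGo (fuel+1) mid = nextTidyAltGo (fuel+1) mid := by
  show (match pyAScan (PySem.List.enumerate (PySem.Int.toChars mid) 0)
            (PySem.List.pyGetD (PySem.Int.toChars mid) 0 ' ') (PySem.Int.toChars mid) with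
        | some filled => (PySem.Int.ofChars? filled).getD 0
        | none => nextTidyGo fuel (mid + 1))
      = (match pyBFind (PySem.Int.toChars mid) 0 with
        | some (k, a) => (PySem.Int.ofChars? ((PySem.Int.toChars mid).take (k + 1) ++
            List.replicate ((PySem.Int.toChars mid).length - k - 1) a)).getD 0
        | none => nextTidyAltGo fuel (mid + 1))
  cases hs : PySem.Int.toChars mid with
  | nil => simp [PySem.List.enumerate_nil, pyAScan, pyBFind, ih (mid + 1)]
  | cons c rest =>
    have h0 : PySem.List.pyGetD (c :: rest) 0 ' ' = c := PySem.List.pyGetD_zero_cons c rest ' '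
    rw [h0, PySem.List.enumerate_cons]
    simp only [pyAScan, gt_iff_lt, lt_irrefl, if_false]
    have e1 : (0 : Int) + 1 = ((0 : Nat) : Int) + 1 := by norm_num
    rw [e1, scan_eq rest c 0 (c :: rest) (by simp; omega)]
    cases hb : pyBFind (c :: rest) 0 with
    | none => simp [ih (mid + 1)]
    | some p => cases p with | mk k a => simp

lemma go_eq (fuel : Nat) (mid : Int) : nextTidyGo fuel mid = nextTidyAltGo fuel mid := by
  induction fuel generalizing mid with
  | zero => rfl
  | succ f ih => exact step_eq f mid ih

-- ===== VERDICT (by name: the statement is the Claim_ definition above) =====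
theorem nextTidy_spec : Claim_equal_nextTidy := by
  intro mid _
  unfold Spec_nextTidy nextTidy nextTidy_alt
  exact go_eq 64 mid
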